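-- pv_equiv track=rewrite | github.com/CorruptedInfantryBots/ci-wl-assistant-v2 | main.py | deduplicate_members_data
-- ===== SOURCE A (Python) =====
-- def deduplicate_members_data(members_data):
--     unique_members = {}
--
--     for member in members_data:
--         discord_id = member.get('discord_user_id')
--         if not discord_id:
--             continue
--
--         # If this discord_id hasn't been seen yet, add it
--         if discord_id not in unique_members:
--             unique_members[discord_id] = member
--         # If we already have this user, prefer the one with latest_seeding_activity
--         elif 'latest_seeding_activity' in member and 'latest_seeding_activity' not in unique_members[discord_id]:
--             unique_members[discord_id] = member
--         # If both have latest_seeding_activity, prefer the newer one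
--         elif ('latest_seeding_activity' in member and 'latest_seeding_activity' in unique_members[discord_id] and
--               member['latest_seeding_activity'] > unique_members[discord_id]['latest_seeding_activity']):
--             unique_members[discord_id] = member
--
--     return list(unique_members.values())
-- ===== SOURCE B (Python) =====
-- def deduplicate_members_data(members_data):
--     # Two-pass decomposition: group members by discord_user_id, then pick each
--     # group's best entry with max (presence of latest_seeding_activity dominates,
--     # then newest value; max keeps the first maximal element = first appearance).
--     groups = {}
--     for member in members_data:
--         discord_id = member.get('discord_user_id')
--         if discord_id:
--             groups.setdefault(discord_id, []).append(member)
--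
--     def priority(member):
--         if 'latest_seeding_activity' in member:
--             return (1, member['latest_seeding_activity'])
--         return (0, '')
--
--     return [max(group, key=priority) for group in groups.values()]
-- ===== Notes on version B (the rewrite author's own statement) =====
-- stated objective: alternative
-- what changed: A keeps a running best-member-per-id dict with an inline three-branch elif collision chain; B first groups all members by discord_user_id into a dict of lists and then, in a separate pass, selects each group's winner with max over a (has-activity, activity) priority key.
import Mathlib
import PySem

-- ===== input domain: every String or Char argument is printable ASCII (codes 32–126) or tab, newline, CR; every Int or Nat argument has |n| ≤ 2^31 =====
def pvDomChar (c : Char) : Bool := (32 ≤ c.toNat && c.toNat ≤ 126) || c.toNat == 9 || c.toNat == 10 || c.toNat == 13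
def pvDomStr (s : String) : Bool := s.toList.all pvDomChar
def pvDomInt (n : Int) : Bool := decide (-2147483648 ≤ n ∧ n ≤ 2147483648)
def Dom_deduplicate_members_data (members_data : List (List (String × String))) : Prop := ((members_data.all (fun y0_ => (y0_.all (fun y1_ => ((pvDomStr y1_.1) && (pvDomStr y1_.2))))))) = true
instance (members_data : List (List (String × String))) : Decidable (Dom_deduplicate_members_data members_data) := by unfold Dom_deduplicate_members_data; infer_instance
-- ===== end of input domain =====

-- B replaces A's inline best-so-far collision chain by a two-pass decomposition
-- (group by id, then select each group's max by a presence-then-value key); objective: alternative.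

-- ===== PORT A =====
-- member.get(key) on the member dict (first-match association-list lookup)
def pvMemberGet (m : List (String × String)) (k : String) : Option String :=
  (PySem.Dict.mk m).get? k

-- one iteration of A's for-loop over unique_members
def pvStepA (um : PySem.Dict String (List (String × String)))
    (member : List (String × String)) : PySem.Dict String (List (String × String)) :=
  match pvMemberGet member "discord_user_id" with
  | none => um                                   -- not discord_id: continue
  | some did =>
    if did = "" then um                          -- not discord_id: continue
    else if !(um.contains did) then
      um.insert did member
    else
      let cur := um.getD did []
      if (pvMemberGet member "latest_seeding_activity").isSome &&
         !(pvMemberGet cur "latest_seeding_activity").isSome then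
        um.insert did member
      else if (pvMemberGet member "latest_seeding_activity").isSome &&
              (pvMemberGet cur "latest_seeding_activity").isSome &&
              decide ((pvMemberGet cur "latest_seeding_activity").getD "" <
                      (pvMemberGet member "latest_seeding_activity").getD "") then
        um.insert did member
      else um

def deduplicate_members_data (members_data : List (List (String × String))) :
    List (List (String × String)) :=
  (members_data.foldl pvStepA PySem.Dict.empty).values

-- ===== PORT B =====
-- priority(member): (1, activity) if present, else (0, '')
def pvPriority (member : List (String × String)) : Bool × String :=
  match pvMemberGet member "latest_seeding_activity" with
  | some v => (true, v)
  | none => (false, "")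

-- Python tuple '>' on the priority pairs (False < True, then string order)
def pvPriGt (p q : Bool × String) : Bool :=
  (!q.1 && p.1) || (p.1 == q.1 && decide (q.2 < p.2))

-- max(h :: t, key=pvPriority): first maximal element
def pvMaxByPriority (h : List (String × String)) (t : List (List (String × String))) :
    List (String × String) :=
  t.foldl (fun best m => if pvPriGt (pvPriority m) (pvPriority best) then m else best) h

-- select a group's winner (groups are built nonempty; [] case only totalizes Python's max)
def pvSelect (g : List (List (String × String))) : List (String × String) :=
  match g with
  | [] => []
  | h :: t => pvMaxByPriority h t

-- one iteration of B's grouping loop: groups.setdefault(did, []).append(member)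
def pvGroupStep (d : PySem.Dict String (List (List (String × String))))
    (member : List (String × String)) : PySem.Dict String (List (List (String × String))) :=
  match pvMemberGet member "discord_user_id" with
  | none => d
  | some did => if did = "" then d else d.modify did [] (· ++ [member])

def deduplicate_members_data_alt (members_data : List (List (String × String))) :
    List (List (String × String)) :=
  ((members_data.foldl pvGroupStep PySem.Dict.empty).values).map pvSelect

-- ===== PRECONDITION & SPEC =====
def Spec_deduplicate_members_data (members_data : List (List (String × String))) (out : List (List (String × String))) : Prop := out = deduplicate_members_data_alt members_data
instance (members_data : List (List (String × String))) (out : List (List (String × String))) : Decidable (Spec_deduplicate_members_data members_data out) := by unfold Spec_deduplicate_members_data; infer_instance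

-- ===== CLAIM (what is proved, stated in full; the proofs are below) =====
def Claim_equal_deduplicate_members_data : Prop := ∀ (members_data : List (List (String × String))), Dom_deduplicate_members_data members_data → Spec_deduplicate_members_data members_data (deduplicate_members_data members_data)

-- ===== LEMMAS AND PROOFS =====

-- Invariant tying A's best-so-far dict to B's group dict: same keys (Nodup),
-- every group nonempty, and A's value at each key is the selection from B's group.
def pvInv (um : PySem.Dict String (List (String × String)))
    (gd : PySem.Dict String (List (List (String × String)))) : Prop :=
  gd.keys.Nodup ∧ (∀ p ∈ gd.items, p.2 ≠ []) ∧
    um.items = gd.items.map (fun p => (p.1, pvSelect p.2))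

lemma pvInv_keys_eq {um gd} (h : pvInv um gd) : um.keys = gd.keys := by
  show um.items.map (·.1) = gd.items.map (·.1)
  rw [h.2.2, List.map_map]
  rfl

-- selecting from a group extended on the right = compare the new member with the old winner
lemma pvSelect_append (g : List (List (String × String))) (hg : g ≠ [])
    (m : List (String × String)) :
    pvSelect (g ++ [m]) =
      if pvPriGt (pvPriority m) (pvPriority (pvSelect g)) then m else pvSelect g := by
  cases g with
  | nil => exact absurd rfl hg
  | cons h t =>
    show pvMaxByPriority h (t ++ [m]) = _
    unfold pvMaxByPriority
    rw [List.foldl_append]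
    rfl

-- in a Nodup-keys dict, an items entry with the looked-up key carries the looked-up value
lemma pvEntry_unique {ν : Type} (gd : PySem.Dict String ν) (hnd : gd.keys.Nodup)
    (did : String) (g : ν) (hg : gd.get? did = some g)
    (p : String × ν) (hp : p ∈ gd.items) (hk : p.1 = did) : p = (did, g) := by
  have h1 : gd.get? p.1 = some p.2 := PySem.Dict.get?_of_mem_items _ hp hnd
  rw [hk, hg] at h1
  cases p
  simp_all

lemma pvInv_step (um : PySem.Dict String (List (String × String)))
    (gd : PySem.Dict String (List (List (String × String))))
    (m : List (String × String)) (h : pvInv um gd) :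
    pvInv (pvStepA um m) (pvGroupStep gd m) := by
  obtain ⟨hnd, hne, hitems⟩ := h
  unfold pvStepA pvGroupStep
  cases hdid : pvMemberGet m "discord_user_id" with
  | none => exact ⟨hnd, hne, hitems⟩
  | some did =>
    by_cases hempty : did = ""
    · simp only [hempty, ite_true]
      exact ⟨hnd, hne, hitems⟩
    · simp only [if_neg hempty]
      have hkeys : um.keys = gd.keys := pvInv_keys_eq ⟨hnd, hne, hitems⟩
      have hcont : um.contains did = gd.contains did := by
        rw [PySem.Dict.contains_eq_decide_mem_keys, PySem.Dict.contains_eq_decide_mem_keys, hkeys]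
      by_cases hc : gd.contains did = true
      · -- key present: A may replace its best, B appends to the group
        have hmodify : gd.modify did [] (· ++ [m]) = gd.insert did (gd.getD did [] ++ [m]) := rfl
        obtain ⟨g, hg⟩ : ∃ g, gd.get? did = some g := by
          have := PySem.Dict.contains_eq_isSome_get? (d := gd) (k := did)
          rw [hc] at this
          exact Option.isSome_iff_exists.mp this.symm
        have hgd : gd.getD did [] = g := PySem.Dict.getD_of_get?_eq_some _ _ hg
        have hgne : g ≠ [] := hne (did, g) (PySem.Dict.mem_items_of_get?_eq_some _ hg)
        have humg : um.get? did = some (pvSelect g) := by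
          apply PySem.Dict.get?_of_mem_items um (k := did) (v := pvSelect g)
          · rw [hitems]
            exact List.mem_map.mpr ⟨(did, g), PySem.Dict.mem_items_of_get?_eq_some _ hg, rfl⟩
          · rw [hkeys]; exact hnd
        have hcur : um.getD did [] = pvSelect g := PySem.Dict.getD_of_get?_eq_some _ _ humg
        simp only [hcont, hc, Bool.not_true, Bool.false_eq_true, ite_false, hcur,
          hmodify, hgd]
        -- new group dict items
        have hgitems : (gd.insert did (g ++ [m])).items =
            gd.items.map (fun p => if p.1 == did then (did, g ++ [m]) else p) :=
          PySem.Dict.items_insert_of_contains _ _ hc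
        have hsel : pvSelect (g ++ [m]) =
            if pvPriGt (pvPriority m) (pvPriority (pvSelect g)) then m else pvSelect g :=
          pvSelect_append g hgne m
        have hnd' : (gd.insert did (g ++ [m])).keys.Nodup := PySem.Dict.nodup_keys_insert _ _ _ hnd
        have hne' : ∀ p ∈ (gd.insert did (g ++ [m])).items, p.2 ≠ [] := by
          intro p hp
          rcases (PySem.Dict.mem_items_insert _ _ _ _).mp hp with hpe | ⟨hpm, _⟩
          · rw [hpe]; simp
          · exact hne p hpm
        have humi : (um.insert did m).items =
            um.items.map (fun p => if p.1 == did then (did, m) else p) :=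
          PySem.Dict.items_insert_of_contains _ _ (by rw [hcont]; exact hc)
        -- A replaces: the winner of the extended group is the new member
        have hins : pvSelect (g ++ [m]) = m →
            (um.insert did m).items =
              (gd.insert did (g ++ [m])).items.map (fun p => (p.1, pvSelect p.2)) := by
          intro hx
          rw [hgitems, List.map_map, humi, hitems, List.map_map]
          apply List.map_congr_left
          intro p hp
          by_cases hk : p.1 = did
          · simp [Function.comp, hk, hx]
          · simp [Function.comp, hk]
        -- A keeps its best: the winner of the extended group is unchanged
        have hkeep : pvSelect (g ++ [m]) = pvSelect g →
            um.items = (gd.insert did (g ++ [m])).items.map (fun p => (p.1, pvSelect p.2)) := by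
          intro hx
          rw [hgitems, List.map_map, hitems]
          apply List.map_congr_left
          intro p hp
          by_cases hk : p.1 = did
          · have hpeq : p = (did, g) := pvEntry_unique gd hnd did g hg p hp hk
            rw [hpeq]
            simp [Function.comp, hx]
          · simp [Function.comp, hk]
        refine ⟨hnd', hne', ?_⟩
        cases hm : pvMemberGet m "latest_seeding_activity" with
        | none =>
          have hpg : pvPriGt (pvPriority m) (pvPriority (pvSelect g)) = false := by
            unfold pvPriGt pvPriority
            rw [hm]
            cases pvMemberGet (pvSelect g) "latest_seeding_activity" <;> simp
          simp only [Option.isSome_none, Bool.false_and, Bool.false_eq_true, ite_false]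
          exact hkeep (by rw [hsel, hpg]; simp)
        | some a =>
          cases hcg : pvMemberGet (pvSelect g) "latest_seeding_activity" with
          | none =>
            have hpg : pvPriGt (pvPriority m) (pvPriority (pvSelect g)) = true := by
              unfold pvPriGt pvPriority
              rw [hm, hcg]
              simp
            simp only [Option.isSome_some, Option.isSome_none, Bool.not_false,
              Bool.true_and, Bool.and_true, ite_true]
            exact hins (by rw [hsel, hpg]; simp)
          | some b =>
            have hpg : pvPriGt (pvPriority m) (pvPriority (pvSelect g)) = decide (b < a) := by
              unfold pvPriGt pvPriority
              rw [hm, hcg]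
              simp
            simp only [Option.isSome_some, Bool.not_true, Bool.and_false,
              Bool.false_eq_true, ite_false, Option.getD_some, Bool.true_and, Bool.and_true]
            split
            · next hd =>
              have habP : b < a := of_decide_eq_true hd
              have hpg' : pvPriGt (pvPriority m) (pvPriority (pvSelect g)) = true := by
                rw [hpg]; exact decide_eq_true habP
              exact hins (by rw [hsel, hpg']; simp)
            · next hd =>
              have habP : ¬ b < a := by
                intro hx; exact hd (decide_eq_true hx)
              have hpg' : pvPriGt (pvPriority m) (pvPriority (pvSelect g)) = false := by
                rw [hpg]; exact decide_eq_false habP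
              exact hkeep (by rw [hsel, hpg']; simp)
      · -- new key: A inserts the member, B starts a singleton group
        have hcf : gd.contains did = false := by
          cases hx : gd.contains did
          · rfl
          · exact absurd hx hc
        have hmodify : gd.modify did [] (· ++ [m]) = gd.insert did (gd.getD did [] ++ [m]) := rfl
        have hgd0 : gd.getD did [] = [] := PySem.Dict.getD_of_not_contains _ _ hcf
        have hnotmem : did ∉ gd.keys := by
          intro hx
          rw [PySem.Dict.contains_eq_decide_mem_keys] at hcf
          simp [hx] at hcf
        simp only [hcont, hcf, Bool.not_false, ite_true, hmodify, hgd0, List.nil_append]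
        refine ⟨PySem.Dict.nodup_keys_insert _ _ _ hnd, ?_, ?_⟩
        · intro p hp
          rcases (PySem.Dict.mem_items_insert _ _ _ _).mp hp with hpe | ⟨hpm, _⟩
          · rw [hpe]; simp
          · exact hne p hpm
        · rw [PySem.Dict.items_insert_of_not_contains _ _ hcf,
            PySem.Dict.items_insert_of_not_contains _ _ (by rw [hcont]; exact hcf),
            List.map_append, hitems]
          rfl

lemma pvInv_foldl (md : List (List (String × String)))
    (um : PySem.Dict String (List (String × String)))
    (gd : PySem.Dict String (List (List (String × String)))) (h : pvInv um gd) :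
    pvInv (md.foldl pvStepA um) (md.foldl pvGroupStep gd) := by
  induction md generalizing um gd with
  | nil => exact h
  | cons m rest ih => exact ih _ _ (pvInv_step um gd m h)

-- ===== VERDICT (by name: the statement is the Claim_ definition above) =====
theorem deduplicate_members_data_spec : Claim_equal_deduplicate_members_data := by
  intro md _hdom
  show deduplicate_members_data md = deduplicate_members_data_alt md
  have hbase : pvInv PySem.Dict.empty PySem.Dict.empty := by
    refine ⟨?_, ?_, rfl⟩
    · exact PySem.Dict.nodup_keys_empty
    · intro p hp
      simp [PySem.Dict.empty] at hp
  have h := pvInv_foldl md PySem.Dict.empty PySem.Dict.empty hbase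
  unfold deduplicate_members_data deduplicate_members_data_alt
  show (md.foldl pvStepA PySem.Dict.empty).items.map (·.2) =
    ((md.foldl pvGroupStep PySem.Dict.empty).items.map (·.2)).map pvSelect
  rw [h.2.2, List.map_map, List.map_map]
  rfl
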